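-- pv_equiv track=rewrite | github.com/alexandraback/datacollection | solutions_5695413893988352_0/Python/kmwho/B-small.py | allPos
-- ===== SOURCE A (Python) =====
-- def allPos( C ):
-- 	allCs = [ "" ]
-- 	for ci in C:
-- 		if ci == "?":
-- 			newCs = [ s+cj for cj in "0123456789" for s in allCs]
-- 		else:
-- 			newCs = [ s+ci for s in allCs ]
-- 		allCs = newCs
-- 	return [ int(s) for s in allCs ]
-- ===== SOURCE B (Python) =====
-- def allPos(C):
--     # index-decoding: the j-th '?' (left to right) carries the j-th base-10
--     # digit of the counter n (least significant first), which reproduces A's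
--     # order: later wildcards vary slower.
--     qs = [i for i, c in enumerate(C) if c == '?']
--     out = []
--     for n in range(10 ** len(qs)):
--         chars = list(C)
--         m = n
--         for i in qs:
--             chars[i] = str(m % 10)
--             m //= 10
--         out.append(int(''.join(chars)))
--     return out
-- ===== Notes on version B (the rewrite author's own statement) =====
-- stated objective: alternative
-- what changed: Replaces A's breadth-first list-of-strings doubling loop (rebuilding the whole candidate list at every character) by direct index decoding: enumerate n in range(10**k) and write the base-10 digits of n into the wildcard positions, least-significant digit at the leftmost '?', which yields exactly A's order.
import Mathlib
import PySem

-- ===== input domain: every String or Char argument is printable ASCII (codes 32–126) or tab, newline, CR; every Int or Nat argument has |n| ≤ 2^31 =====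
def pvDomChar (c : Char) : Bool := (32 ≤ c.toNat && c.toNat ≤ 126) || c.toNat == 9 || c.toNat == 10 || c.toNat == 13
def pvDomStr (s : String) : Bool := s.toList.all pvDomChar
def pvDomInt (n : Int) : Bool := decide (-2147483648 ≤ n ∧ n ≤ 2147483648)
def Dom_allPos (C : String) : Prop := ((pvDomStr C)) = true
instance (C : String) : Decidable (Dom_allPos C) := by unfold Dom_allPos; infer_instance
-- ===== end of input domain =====

-- B replaces A's breadth-first rebuild of the whole candidate-string list per character by
-- direct index decoding of a counter over the wildcard positions (alternative algorithm, same output).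

-- ===== PORT A =====
-- one iteration of A's 'for ci in C' loop over the list of partial strings (as List Char)
def allPosStep (allCs : List (List Char)) (ci : Char) : List (List Char) :=
  if ci = '?' then
    ("0123456789".toList).flatMap (fun cj => allCs.map (fun s => s ++ [cj]))
  else
    allCs.map (fun s => s ++ [ci])

-- int(s) is PySem.Int.ofChars?; Pre_allPos guarantees it is 'some', so .getD 0 is never the default
def allPos (C : String) : List Int :=
  (C.toList.foldl allPosStep [([] : List Char)]).map (fun s => (PySem.Int.ofChars? s).getD 0)

-- ===== PORT B =====
-- the wildcard index list [i for i, c in enumerate(C) if c == '?']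
def allPosQs (cs : List Char) : List Int :=
  (PySem.List.enumerate cs 0).filterMap (fun p => if p.2 = '?' then some p.1 else none)

-- body of the inner 'for i in qs' loop; str(m % 10) for m ≥ 0 is the single
-- character chr(48 + m % 10), and ''.join over the char list is the identity here
def allPosFill (st : List Char × Int) (i : Int) : List Char × Int :=
  (st.1.set i.toNat (Char.ofNat (48 + (PySem.Int.mod st.2 10).toNat)), PySem.Int.floordiv st.2 10)

def allPos_alt (C : String) : List Int :=
  let qs := allPosQs C.toList
  (PySem.List.pyRange 0 ((10 : Int) ^ qs.length) 1).map (fun n =>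
    (PySem.Int.ofChars? ((qs.foldl allPosFill (C.toList, n)).1)).getD 0)

-- ===== PRECONDITION & SPEC =====
-- Exactly where A's final int(s) parses: since every '?' becomes a digit and digit choice never
-- affects int()-validity, A returns normally iff the '0'-filled template parses as a Python int.
def Pre_allPos (C : String) : Prop :=
  PySem.Int.ofChars? (C.toList.map (fun c => if c = '?' then '0' else c)) ≠ none
instance (C : String) : Decidable (Pre_allPos C) := by unfold Pre_allPos; infer_instance
def pvWitness_allPos : String := "1?"

def Spec_allPos (C : String) (out : List Int) : Prop := out = allPos_alt C
instance (C : String) (out : List Int) : Decidable (Spec_allPos C out) := by unfold Spec_allPos; infer_instance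

-- ===== CLAIM (what is proved, stated in full; the proofs are below) =====
def Claim_equal_allPos : Prop := ∀ (C : String), Dom_allPos C → Pre_allPos C → Spec_allPos C (allPos C)

-- ===== LEMMAS AND PROOFS =====

-- the string obtained by writing the base-10 digits of n into the '?' slots,
-- least-significant digit at the leftmost '?'
def fillDec : List Char → Nat → List Char
  | [], _ => []
  | c :: t, n => if c = '?' then Char.ofNat (48 + n % 10) :: fillDec t (n / 10) else c :: fillDec t n

-- number of wildcards
def qn (cs : List Char) : Nat := cs.countP (fun c => c = '?')

lemma qn_append_singleton (cs : List Char) (c : Char) :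
    qn (cs ++ [c]) = qn cs + (if c = '?' then 1 else 0) := by
  simp only [qn, List.countP_append, List.countP_cons, List.countP_nil]
  split <;> simp_all

lemma fillDec_append (xs : List Char) (c : Char) (n : Nat) :
    fillDec (xs ++ [c]) n =
      fillDec xs n ++ (if c = '?' then [Char.ofNat (48 + n / 10 ^ qn xs % 10)] else [c]) := by
  induction xs generalizing n with
  | nil => simp [fillDec, qn]
  | cons x t ih =>
      by_cases hx : x = '?'
      · simp [fillDec, hx, ih, qn, Nat.div_div_eq_div_mul, pow_succ, Nat.mul_comm]
      · simp [fillDec, hx, ih, qn]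

lemma fillDec_add_mul (xs : List Char) (n d : Nat) :
    fillDec xs (n + d * 10 ^ qn xs) = fillDec xs n := by
  induction xs generalizing n d with
  | nil => simp [fillDec]
  | cons x t ih =>
      by_cases hx : x = '?'
      · subst hx
        have e : qn ('?' :: t) = qn t + 1 := by simp [qn]
        simp only [fillDec, e, pow_succ, if_pos]
        have e2 : d * (10 ^ qn t * 10) = d * 10 ^ qn t * 10 := by ring
        rw [e2, Nat.add_mul_mod_self_right, Nat.add_mul_div_right _ _ (by norm_num), ih]
      · have e : qn (x :: t) = qn t := by simp [qn, hx]
        simp [fillDec, hx, e, ih]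

lemma range_mul_flatMap {α : Type} (a b : Nat) (g : Nat → α) :
    (List.range (a * b)).map g =
      (List.range a).flatMap (fun d => (List.range b).map (fun n => g (n + d * b))) := by
  induction a with
  | zero => simp
  | succ a ih =>
      rw [Nat.succ_mul, List.range_add, List.map_append, ih, List.range_succ,
        List.flatMap_append]
      simp [Nat.add_comm]

lemma digits_eq : "0123456789".toList = (List.range 10).map (fun d => Char.ofNat (48 + d)) := by
  decide

lemma A_fold (cs : List Char) :
    cs.foldl allPosStep [([] : List Char)] = (List.range (10 ^ qn cs)).map (fillDec cs) := by
  induction cs using List.reverseRecOn with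
  | nil => simp [qn, fillDec]
  | append_singleton xs c ih =>
      rw [List.foldl_append, List.foldl_cons, List.foldl_nil, ih]
      by_cases hc : c = '?'
      · subst hc
        rw [allPosStep, if_pos rfl, digits_eq, List.flatMap_map,
          qn_append_singleton, if_pos rfl, pow_succ, Nat.mul_comm, range_mul_flatMap]
        apply List.flatMap_congr
        intro d hd
        rw [List.map_map]
        apply List.map_congr_left
        intro n hn
        rw [List.mem_range] at hd hn
        simp only [Function.comp]
        rw [fillDec_append, if_pos rfl, fillDec_add_mul]
        congr 2
        rw [Nat.add_mul_div_right _ _ (by positivity),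
          Nat.div_eq_of_lt hn]
        simp [Nat.mod_eq_of_lt hd]
      · rw [allPosStep, if_neg hc, List.map_map, qn_append_singleton, if_neg hc]
        simp only [Nat.add_zero]
        apply List.map_congr_left
        intro n _
        simp [Function.comp, fillDec_append, hc]

lemma enum_shift (cs : List Char) (s : Int) :
    PySem.List.enumerate cs s = (PySem.List.enumerate cs 0).map (fun p => (p.1 + s, p.2)) := by
  induction cs generalizing s with
  | nil => simp [PySem.List.enumerate_nil]
  | cons c t ih =>
      rw [PySem.List.enumerate_cons, PySem.List.enumerate_cons, ih (s + 1), ih (0 + 1)]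
      simp [List.map_map, Function.comp]
      intro a b _
      omega

lemma qs_cons (c : Char) (cs : List Char) :
    allPosQs (c :: cs) =
      (if c = '?' then [(0 : Int)] else []) ++ (allPosQs cs).map (· + 1) := by
  rw [allPosQs, PySem.List.enumerate_cons, enum_shift cs (0 + 1), List.filterMap_cons,
    List.filterMap_map, allPosQs, List.map_filterMap]
  have e : ∀ p : Int × Char,
      ((fun p : Int × Char => if p.2 = '?' then some p.1 else none) ∘
        fun p : Int × Char => (p.1 + (0 + 1), p.2)) p =
      (fun p : Int × Char => Option.map (· + 1) (if p.2 = '?' then some p.1 else none)) p := by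
    intro p; by_cases hp : p.2 = '?' <;> simp [hp]
  rw [List.filterMap_congr (fun p _ => e p)]
  by_cases hc : c = '?' <;> simp [hc]

lemma qs_nonneg (cs : List Char) : ∀ i ∈ allPosQs cs, 0 ≤ i := by
  induction cs with
  | nil => simp [allPosQs, PySem.List.enumerate_nil]
  | cons c t ih =>
      intro i hi
      rw [qs_cons] at hi
      rcases List.mem_append.mp hi with h | h
      · split at h <;> simp_all
      · obtain ⟨j, hj, rfl⟩ := List.mem_map.mp h
        have := ih j hj; omega

lemma qs_length (cs : List Char) : (allPosQs cs).length = qn cs := by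
  induction cs with
  | nil => simp [allPosQs, PySem.List.enumerate_nil, qn]
  | cons c t ih =>
      rw [qs_cons]
      by_cases hc : c = '?' <;> simp [hc, ih, qn]

lemma shift_fold (qs : List Int) (h : ∀ i ∈ qs, 0 ≤ i) (c : Char) (chars : List Char) (m : Int) :
    (qs.map (· + 1)).foldl allPosFill (c :: chars, m) =
      (c :: (qs.foldl allPosFill (chars, m)).1, (qs.foldl allPosFill (chars, m)).2) := by
  induction qs generalizing chars m with
  | nil => simp
  | cons i t ih =>
      have hi : 0 ≤ i := h i (by simp)
      have ht : ∀ j ∈ t, 0 ≤ j := fun j hj => h j (by simp [hj])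
      have hnat : (i + 1).toNat = i.toNat + 1 := by omega
      simp only [List.map_cons, List.foldl_cons, allPosFill, hnat, List.set_cons_succ]
      exact ih ht _ _

lemma fillB (cs : List Char) (n : Nat) :
    ((allPosQs cs).foldl allPosFill (cs, (n : Int))).1 = fillDec cs n := by
  induction cs generalizing n with
  | nil => simp [allPosQs, PySem.List.enumerate_nil, fillDec]
  | cons c t ih =>
      rw [qs_cons]
      by_cases hc : c = '?'
      · subst hc
        have hm : PySem.Int.mod ((n : Nat) : Int) 10 = ((n % 10 : Nat) : Int) := by
          exact_mod_cast PySem.Int.mod_natCast n 10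
        have hd : PySem.Int.floordiv ((n : Nat) : Int) 10 = ((n / 10 : Nat) : Int) := by
          exact_mod_cast PySem.Int.floordiv_natCast n 10
        simp only [if_true, List.singleton_append, List.foldl_cons, allPosFill, hm, hd,
          Int.toNat_zero, List.set_cons_zero, Int.toNat_natCast]
        rw [shift_fold _ (qs_nonneg t), ih]
        simp [fillDec]
      · simp only [if_neg hc, List.nil_append,
          shift_fold _ (qs_nonneg t) c t ((n : Nat) : Int), ih]
        simp [fillDec, hc]

lemma main_eq (C : String) : allPos C = allPos_alt C := by
  rw [allPos, allPos_alt, A_fold, List.map_map, qs_length,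
    show ((10 : Int) ^ qn C.toList) = (((10 ^ qn C.toList : Nat)) : Int) by push_cast; ring,
    PySem.List.pyRange_zero_nat, List.map_map]
  apply List.map_congr_left
  intro k _
  simp only [Function.comp]
  rw [fillB]

-- ===== VERDICT (by name: the statement is the Claim_ definition above) =====
theorem allPos_spec : Claim_equal_allPos := by
  intro C _ _
  exact main_eq C
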